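-- pv_equiv track=rewrite | github.com/memmmmike/hanirizer | src/logging_config.py | _redact_values
-- ===== SOURCE A (Python) =====
-- def _redact_values(message: str) -> str:
--     """Redact values after = signs in message."""
--     parts = message.split(" ")
--     redacted_parts = []
--     for part in parts:
--         if "=" in part:
--             key, _ = part.split("=", 1)
--             redacted_parts.append(f"{key}=<redacted>")
--         else:
--             redacted_parts.append(part)
--     return " ".join(redacted_parts)
-- ===== SOURCE B (Python) =====
-- import re
--
-- def _redact_values(message: str) -> str:
--     """Redact values after = signs in message."""
--     return re.sub(r'=[^ ]*', '=<redacted>', message)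
-- ===== Notes on version B (the rewrite author's own statement) =====
-- stated objective: idiomatic
-- what changed: Replaced the split-on-space / per-token loop / rejoin with a single regex substitution that rewrites each equals sign together with its following run of non-space characters to the redaction marker in one left-to-right pass, with no token list.
import Mathlib
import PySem

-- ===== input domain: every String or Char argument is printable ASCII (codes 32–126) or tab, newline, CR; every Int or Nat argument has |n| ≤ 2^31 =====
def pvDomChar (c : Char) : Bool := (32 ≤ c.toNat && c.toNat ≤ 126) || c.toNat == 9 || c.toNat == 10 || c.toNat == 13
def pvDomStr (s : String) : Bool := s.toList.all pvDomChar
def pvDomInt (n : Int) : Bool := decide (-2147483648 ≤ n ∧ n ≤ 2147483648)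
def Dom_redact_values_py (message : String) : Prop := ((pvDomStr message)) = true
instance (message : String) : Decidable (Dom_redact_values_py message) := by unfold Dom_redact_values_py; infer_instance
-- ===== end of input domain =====

-- B replaces A's split-on-space / per-token loop / rejoin with a single left-to-right
-- regex-style scan of the string (one pass, no intermediate token list).

-- the string literal "=<redacted>" both programs use, as a character list
def pvRedactTok : List Char := "=<redacted>".toList

-- ===== PORT A =====
-- literal transliteration of A: split on " ", loop appending a per-part result, join with " "
def redact_values_py (message : String) : String :=
  let parts := PySem.Chars.splitOn message.toList [' ']
  let redacted_parts := parts.foldl (fun acc part =>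
    if PySem.Chars.isIn ['='] part then
      acc ++ [(PySem.Chars.splitOnMax part ['='] 1).headD [] ++ pvRedactTok]
    else
      acc ++ [part]) []
  String.ofList (PySem.Chars.join [' '] redacted_parts)

-- ===== PORT B =====
-- hand port of Source B's re.sub(r'=[^ ]*', '=<redacted>', message): one left-to-right scan;
-- at each '=' emit '=<redacted>' and skip the following run of non-space characters.
-- Exact: the regex engine scans left to right, the match '=[^ ]*' is greedy, and
-- matching resumes right after the end of the previous match.
def altGo : List Char → List Char
  | [] => []
  | c :: rest =>
    if c = '=' then pvRedactTok ++ altGo (rest.dropWhile (· ≠ ' '))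
    else c :: altGo rest
termination_by cs => cs.length
decreasing_by
  · have := List.length_dropWhile_le (fun x => decide (x ≠ ' ')) rest
    simp only [List.length_cons]; omega
  · simp

def redact_values_py_alt (message : String) : String :=
  String.ofList (altGo message.toList)

-- ===== PRECONDITION & SPEC =====
def Spec_redact_values_py (message : String) (out : String) : Prop := out = redact_values_py_alt message
instance (message : String) (out : String) : Decidable (Spec_redact_values_py message out) := by unfold Spec_redact_values_py; infer_instance

-- ===== CLAIM (what is proved, stated in full; the proofs are below) =====
def Claim_equal_redact_values_py : Prop := ∀ (message : String), Dom_redact_values_py message → Spec_redact_values_py message (redact_values_py message)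

-- ===== LEMMAS AND PROOFS =====

-- structural model of message.split(" ")
def mySplit : List Char → List (List Char)
  | [] => [[]]
  | c :: t => if c = ' ' then [] :: mySplit t else (mySplit t).modifyHead (c :: ·)

-- A's per-part redaction, in closed form
def myF (p : List Char) : List Char :=
  if '=' ∈ p then p.takeWhile (· ≠ '=') ++ pvRedactTok else p

-- accumulator shape of splitOn.go specialized to sep = [' ']
def gos : List Char → List Char → List (List Char)
  | [], cur => [cur.reverse]
  | c :: rest, cur => if c = ' ' then cur.reverse :: gos rest [] else gos rest (c :: cur)

-- accumulator shape of splitOnMax.go specialized to sep = ['='], maxsplit = 1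
def gos1 : List Char → List Char → List (List Char)
  | [], cur => [cur.reverse]
  | c :: rest, cur => if c = '=' then [cur.reverse, rest] else gos1 rest (c :: cur)

lemma go_spec (fuel : Nat) : ∀ (l cur : List Char) (acc : List (List Char)),
    l.length ≤ fuel →
    PySem.Chars.splitOn.go [' '] fuel l cur acc = acc.reverse ++ gos l cur := by
  induction fuel with
  | zero =>
    intro l cur acc h
    have : l = [] := by cases l <;> simp_all
    subst this
    simp [PySem.Chars.splitOn.go, gos]
  | succ n ih =>
    intro l cur acc h
    cases l with
    | nil => simp [PySem.Chars.splitOn.go, gos]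
    | cons c rest =>
      simp only [PySem.Chars.splitOn.go, gos, List.isPrefixOf, List.length_cons] at *
      by_cases hc : c = ' '
      · subst hc
        simp only [BEq.rfl, Bool.true_and, if_true, List.length_nil, Nat.zero_add,
          List.drop_one, List.tail_cons]
        rw [ih rest [] _ (by omega)]
        simp
      · have hb : (' ' == c && true) = false := by simp [Ne.symm hc]
        rw [hb, if_neg hc]
        simp only [Bool.false_eq_true, if_false]
        exact ih rest (c :: cur) acc (by omega)

lemma gos_eq_mySplit : ∀ (s cur : List Char),
    gos s cur = (mySplit s).modifyHead (cur.reverse ++ ·) := by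
  intro s
  induction s with
  | nil => intro cur; simp [gos, mySplit]
  | cons c t ih =>
    intro cur
    by_cases hc : c = ' '
    · subst hc
      simp only [gos, mySplit, if_true, ih []]
      cases mySplit t <;> simp
    · simp only [gos, mySplit, if_neg hc, ih (c :: cur)]
      cases mySplit t <;> simp

lemma mySplit_ne_nil (s : List Char) : mySplit s ≠ [] := by
  induction s with
  | nil => simp [mySplit]
  | cons c t ih =>
    simp only [mySplit]
    split
    · simp
    · rcases h : mySplit t with _ | ⟨a, b⟩
      · exact absurd h ih
      · simp

lemma splitOn_eq (s : List Char) : PySem.Chars.splitOn s [' '] = mySplit s := by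
  show PySem.Chars.splitOn.go [' '] (s.length + 1) s [] [] = mySplit s
  rw [go_spec (s.length + 1) s [] [] (by omega), gos_eq_mySplit]
  rcases h : mySplit s with _ | ⟨a, b⟩
  · exact absurd h (mySplit_ne_nil s)
  · simp

lemma go1_zero (fuel : Nat) (l cur : List Char) (acc : List (List Char)) :
    PySem.Chars.splitOnMax.go ['='] fuel 0 l cur acc = ((cur.reverse ++ l) :: acc).reverse := by
  cases fuel <;> cases l <;> simp [PySem.Chars.splitOnMax.go]

lemma go1_spec (fuel : Nat) : ∀ (l cur : List Char) (acc : List (List Char)),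
    l.length ≤ fuel →
    PySem.Chars.splitOnMax.go ['='] fuel 1 l cur acc = acc.reverse ++ gos1 l cur := by
  induction fuel with
  | zero =>
    intro l cur acc h
    have : l = [] := by cases l <;> simp_all
    subst this
    simp [PySem.Chars.splitOnMax.go, gos1]
  | succ n ih =>
    intro l cur acc h
    cases l with
    | nil => simp [PySem.Chars.splitOnMax.go, gos1]
    | cons c rest =>
      simp only [PySem.Chars.splitOnMax.go, gos1, List.length_cons, List.isPrefixOf,
        Bool.and_true, if_neg (by omega : ¬(1 = 0))] at *
      by_cases hc : c = '='
      · subst hc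
        simp only [BEq.rfl, if_true, List.length_nil, Nat.zero_add,
          List.drop_one, List.tail_cons]
        rw [go1_zero]
        simp
      · have hb : ('=' == c) = false := by simp [Ne.symm hc]
        rw [hb, if_neg hc]
        simp only [Bool.false_eq_true, if_false]
        exact ih rest (c :: cur) acc (by omega)

lemma gos1_head : ∀ (l cur : List Char), '=' ∈ l →
    (gos1 l cur).headD [] = cur.reverse ++ l.takeWhile (· ≠ '=') := by
  intro l
  induction l with
  | nil => intro cur h; simp at h
  | cons c rest ih =>
    intro cur h
    by_cases hc : c = '='
    · subst hc; simp [gos1]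
    · have hr : '=' ∈ rest := by simp at h; tauto
      simp only [gos1, if_neg hc, List.takeWhile_cons, decide_eq_true_eq]
      rw [ih (c :: cur) hr]
      simp [hc]

lemma isIn_eq_mem (p : List Char) : PySem.Chars.isIn ['='] p = true ↔ '=' ∈ p := by
  rw [PySem.Chars.isIn_iff_infix]
  constructor
  · intro h; exact h.mem (by simp)
  · intro h
    obtain ⟨l1, l2, rfl⟩ := List.append_of_mem h
    exact ⟨l1, l2, by simp⟩

-- A's loop body computes myF on each part
lemma partF_eq (p : List Char) :
    (if PySem.Chars.isIn ['='] p then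
      (PySem.Chars.splitOnMax p ['='] 1).headD [] ++ pvRedactTok
    else p) = myF p := by
  unfold myF
  by_cases h : '=' ∈ p
  · rw [if_pos ((isIn_eq_mem p).mpr h), if_pos h]
    have : PySem.Chars.splitOnMax p ['='] 1 = gos1 p [] := by
      show (if (1 : Int) < 0 then _ else PySem.Chars.splitOnMax.go ['='] (p.length + 1) (1 : Int).toNat p [] []) = _
      rw [if_neg (by omega)]
      exact go1_spec (p.length + 1) p [] [] (by omega)
    rw [this, gos1_head p [] h]
    simp
  · rw [if_neg h, if_neg (by simp [isIn_eq_mem, h])]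

lemma join_cons (p : List Char) (ps : List (List Char)) :
    PySem.Chars.join [' '] (p :: ps) =
      p ++ (if ps = [] then [] else ' ' :: PySem.Chars.join [' '] ps) := by
  cases ps <;> simp [PySem.Chars.join, List.intercalate]

lemma mySplit_decomp (t : List Char) :
    mySplit t = t.takeWhile (· ≠ ' ') ::
      (match t.dropWhile (· ≠ ' ') with
        | [] => ([] : List (List Char))
        | _ :: r => mySplit r) := by
  induction t with
  | nil => simp [mySplit]
  | cons c t ih =>
    by_cases hc : c = ' '
    · subst hc; simp [mySplit]
    · simp only [mySplit, List.takeWhile_cons, List.dropWhile_cons, decide_eq_true_eq,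
        hc, ih]
      simp [hc]

lemma myF_cons (c : Char) (p : List Char) (hc : c ≠ '=') : myF (c :: p) = c :: myF p := by
  unfold myF
  by_cases h : '=' ∈ p
  · rw [if_pos (by simp [h]), if_pos h]
    simp [hc]
  · rw [if_neg (by simp [h, Ne.symm hc]), if_neg h]

lemma drop_head_sp : ∀ (t : List Char) (c' : Char) (r : List Char),
    List.dropWhile (fun x => decide (x ≠ ' ')) t = c' :: r → c' = ' ' := by
  intro t
  induction t with
  | nil => intro c' r hd; simp at hd
  | cons a t ih =>
    intro c' r hd
    by_cases ha : a = ' '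
    · subst ha; simp at hd; tauto
    · rw [List.dropWhile_cons, if_pos (by simp [ha])] at hd
      exact ih c' r hd

lemma altGo_main : ∀ (n : Nat) (s : List Char), s.length ≤ n →
    altGo s = PySem.Chars.join [' '] ((mySplit s).map myF) := by
  intro n
  induction n with
  | zero =>
    intro s h
    have : s = [] := by cases s <;> simp_all
    subst this
    simp [altGo, mySplit, myF]
  | succ n ih =>
    intro s h
    cases s with
    | nil => simp [altGo, mySplit, myF]
    | cons c t =>
      simp only [List.length_cons] at h
      by_cases hsp : c = ' '
      · subst hsp
        rw [show altGo (' ' :: t) = ' ' :: altGo t from by simp [altGo]]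
        have hmt := mySplit_ne_nil t
        simp only [mySplit, if_true, List.map_cons]
        rw [join_cons, if_neg (by simp [hmt])]
        simp only [myF, if_neg (by simp : ¬ '=' ∈ ([] : List Char)),
          List.nil_append]
        rw [ih t (by omega)]
      · by_cases heq : c = '='
        · subst heq
          rw [show altGo ('=' :: t) = pvRedactTok ++ altGo (t.dropWhile (· ≠ ' ')) from by
            simp [altGo]]
          have hms := mySplit_decomp t
          simp only [mySplit, if_neg hsp, hms, List.modifyHead_cons, List.map_cons]
          have hhead : myF ('=' :: t.takeWhile (· ≠ ' ')) = pvRedactTok := by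
            unfold myF
            rw [if_pos (by simp), List.takeWhile_cons]
            simp
          rw [hhead, join_cons]
          rcases hd : t.dropWhile (· ≠ ' ') with _ | ⟨c', r⟩
          · simp [altGo]
          · have hc' : c' = ' ' := drop_head_sp t c' r hd
            subst hc'
            have hlen : r.length ≤ n := by
              have h1 : (t.dropWhile (· ≠ ' ')).length ≤ t.length :=
                List.length_dropWhile_le _ t
              rw [hd] at h1
              simp only [List.length_cons] at h1
              omega
            rw [show altGo (' ' :: r) = ' ' :: altGo r from by simp [altGo]]
            rw [if_neg (by simp [mySplit_ne_nil r]), ih r hlen]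
        · rw [show altGo (c :: t) = c :: altGo t from by simp [altGo, heq]]
          rcases hm : mySplit t with _ | ⟨ht, tl⟩
          · exact absurd hm (mySplit_ne_nil t)
          · simp only [mySplit, if_neg hsp, hm, List.modifyHead_cons, List.map_cons]
            rw [myF_cons c ht heq, join_cons]
            rw [ih t (by omega), hm]
            simp only [List.map_cons]
            rw [join_cons]
            simp

-- ===== VERDICT (by name: the statement is the Claim_ definition above) =====
theorem redact_values_py_spec : Claim_equal_redact_values_py := by
  intro message _
  unfold Spec_redact_values_py redact_values_py redact_values_py_alt
  have hfold : ∀ (parts : List (List Char)) (acc : List (List Char)),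
      parts.foldl (fun acc part =>
        if PySem.Chars.isIn ['='] part then
          acc ++ [(PySem.Chars.splitOnMax part ['='] 1).headD [] ++ pvRedactTok]
        else acc ++ [part]) acc = acc ++ parts.map myF := by
    intro parts
    induction parts with
    | nil => intro acc; simp
    | cons p ps ihp =>
      intro acc
      simp only [List.foldl_cons, List.map_cons]
      by_cases h : PySem.Chars.isIn ['='] p
      · rw [if_pos h, ihp, ← partF_eq p, if_pos h]
        simp
      · rw [if_neg h, ihp, ← partF_eq p, if_neg h]
        simp
  simp only [splitOn_eq, hfold, List.nil_append]
  rw [altGo_main (message.toList.length) message.toList le_rfl]
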